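-- pv_equiv track=rewrite | github.com/HarryR/pyeip1962 | pyeip1962/redc.py | mont_findR
-- ===== SOURCE A (Python) =====
-- def gcd(a, b):
-- 	while b:
-- 		a, b = b, a%b
-- 	return a
--
-- def mont_findR(N, limb_size=64):
-- 	g = 0
-- 	b = 2 ** limb_size
-- 	R = b
-- 	while g != 1:
-- 		R *= b
-- 		if R > N:
-- 			g = gcd(R, N)
-- 	return R
-- ===== SOURCE B (Python) =====
-- def mont_findR(N, limb_size=64):
--     # smallest power R = b**k (k >= 2, b = 2**limb_size) with R > N; for odd N it is
--     # automatically coprime to N, so no gcd loop is needed.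
--     k = max(2, -(-N.bit_length() // limb_size))
--     return 1 << (k * limb_size)
-- ===== Notes on version B (the rewrite author's own statement) =====
-- stated objective: alternative
-- what changed: Replaces the multiply-and-gcd search loop by a closed form: the limb count k is computed from N.bit_length() by one ceiling division and R = 1 << (k*limb_size); for odd N the gcd is always 1, so no gcd is computed at all.
-- outside the precondition, e.g. on mont_findR(0, 0): A returns 1, B raises ZeroDivisionError
import Mathlib
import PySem

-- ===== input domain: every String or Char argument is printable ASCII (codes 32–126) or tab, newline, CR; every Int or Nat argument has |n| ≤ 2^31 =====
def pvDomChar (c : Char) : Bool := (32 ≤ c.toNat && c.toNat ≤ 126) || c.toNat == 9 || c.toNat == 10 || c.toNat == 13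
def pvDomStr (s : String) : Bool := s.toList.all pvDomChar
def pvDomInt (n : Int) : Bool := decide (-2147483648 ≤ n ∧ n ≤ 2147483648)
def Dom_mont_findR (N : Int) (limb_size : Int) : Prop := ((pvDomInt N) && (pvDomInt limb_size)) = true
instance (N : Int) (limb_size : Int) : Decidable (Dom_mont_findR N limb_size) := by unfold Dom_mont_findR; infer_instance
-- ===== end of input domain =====

-- B replaces A's multiply-and-gcd search loop by a closed form from N.bit_length() (objective: alternative).

-- ===== PORT A =====
-- termination helper for the Euclid loop (cited in pyGcd's decreasing_by)
theorem pyGcd_mod_decr (a b : Int) (hb : ¬ b = 0) :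
    (PySem.Int.mod a b).natAbs < b.natAbs := by
  rcases lt_or_gt_of_ne hb with h | h
  · have h1 := PySem.Int.mod_neg_bounds a h
    omega
  · have h1 := PySem.Int.mod_nonneg a h
    have h2 := PySem.Int.mod_lt a h
    omega

-- 'def gcd(a, b): while b: a, b = b, a%b; return a'
def pyGcd (a b : Int) : Int :=
  if _h : b = 0 then a else pyGcd b (PySem.Int.mod a b)
termination_by b.natAbs
decreasing_by exact pyGcd_mod_decr a b _h

-- the 'while g != 1' loop; fuel only makes the recursion total (never exhausted on Pre_)
def montLoop (N b : Int) : Nat → Int → Int → Int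
  | 0, _, R => R
  | fuel + 1, g, R =>
    if g = 1 then R
    else
      let R' := R * b
      let g' := if R' > N then pyGcd R' N else g
      montLoop N b fuel g' R'

def mont_findR (N : Int) (limb_size : Int) : Int :=
  -- b = 2 ** limb_size: exact for limb_size ≥ 0 (a negative exponent gives a Python float, outside Pre_)
  let b : Int := 2 ^ limb_size.toNat
  montLoop N b (N.natAbs + 2) 0 b

-- ===== PORT B =====
def mont_findR_alt (N : Int) (limb_size : Int) : Int :=
  -- k = max(2, -(-N.bit_length() // limb_size))
  let k : Int := max 2 (-(PySem.Int.floordiv (-(PySem.Int.bitLength N : Int)) limb_size))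
  -- 1 << (k * limb_size): exact since k * limb_size ≥ 0 on Pre_ (Python raises on a negative shift)
  (1 : Int) <<< (k * limb_size).toNat

-- ===== PRECONDITION & SPEC =====
-- A returns an int exactly on odd N ≥ 1 with limb_size ≥ 1 (even or nonpositive N and limb_size = 0 with
-- N ≥ 1 make its loop spin forever; a negative limb_size makes it return a float), except the degenerate
-- corner limb_size = 0 ∧ N ≤ 0 where A happens to return 1 (b = 1) while B divides by limb_size and
-- raises ZeroDivisionError; Pre_ excludes that corner.
def Pre_mont_findR (N : Int) (limb_size : Int) : Prop :=
  1 ≤ N ∧ PySem.Int.mod N 2 = 1 ∧ 1 ≤ limb_size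
instance (N : Int) (limb_size : Int) : Decidable (Pre_mont_findR N limb_size) := by
  unfold Pre_mont_findR; infer_instance
def pvWitness_mont_findR : Int × Int := (7, 2)

def Spec_mont_findR (N : Int) (limb_size : Int) (out : Int) : Prop := out = mont_findR_alt N limb_size
instance (N : Int) (limb_size : Int) (out : Int) : Decidable (Spec_mont_findR N limb_size out) := by unfold Spec_mont_findR; infer_instance

-- ===== CLAIM (what is proved, stated in full; the proofs are below) =====
def Claim_equal_mont_findR : Prop := ∀ (N : Int) (limb_size : Int), Dom_mont_findR N limb_size → Pre_mont_findR N limb_size → Spec_mont_findR N limb_size (mont_findR N limb_size)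

-- ===== LEMMAS AND PROOFS =====

-- Euclid's loop on nonnegative ints computes Nat.gcd
theorem pyGcd_natCast (m k : Nat) : pyGcd (m : Int) (k : Int) = (Nat.gcd m k : Int) := by
  induction k using Nat.strong_induction_on generalizing m with
  | _ k ih =>
    rw [pyGcd]
    by_cases hk : (k : Int) = 0
    · have : k = 0 := by exact_mod_cast hk
      simp [this]
    · have hk0 : 0 < k := by omega
      rw [dif_neg hk, PySem.Int.mod_natCast, ih (m % k) (Nat.mod_lt m hk0) k]
      rw [Nat.gcd_comm k (m % k), ← Nat.gcd_rec, Nat.gcd_comm]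

-- gcd(2^e, N) = 1 for odd N
theorem pyGcd_pow_two (e : Nat) (N : Int) (hN : 1 ≤ N) (hodd : PySem.Int.mod N 2 = 1) :
    pyGcd ((2 : Int) ^ e) N = 1 := by
  have h2 : PySem.Int.mod N 2 = N % 2 := PySem.Int.mod_eq_emod_of_pos (by norm_num)
  have hodd' : N.natAbs % 2 = 1 := by omega
  have hN' : ((N.natAbs : Int)) = N := Int.natAbs_of_nonneg (by omega)
  have hpow : ((2 : Int) ^ e) = ((2 ^ e : Nat) : Int) := by push_cast; ring
  rw [hpow, ← hN', pyGcd_natCast]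
  have hc : Nat.Coprime (2 ^ e) N.natAbs :=
    Nat.Coprime.pow_left e (Nat.coprime_two_left.mpr (Nat.odd_iff.mpr hodd'))
  simp [Nat.Coprime] at hc
  simp [hc]

-- N < 2^m ↔ bitLength N ≤ m, for N ≥ 1
theorem lt_pow_iff_bitLength_le (N : Int) (hN : 1 ≤ N) (m : Nat) :
    N < (2 : Int) ^ m ↔ PySem.Int.bitLength N ≤ m := by
  have h1 := PySem.Int.lt_two_pow_bitLength N
  have h2 := PySem.Int.two_pow_bitLength_le N (by omega)
  have hN' : ((N.natAbs : Int)) = N := Int.natAbs_of_nonneg (by omega)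
  have hcast : N < (2 : Int) ^ m ↔ N.natAbs < 2 ^ m := by
    rw [← hN']; exact_mod_cast Iff.rfl
  rw [hcast]
  constructor
  · intro h
    by_contra hle
    have : 2 ^ m ≤ 2 ^ (PySem.Int.bitLength N - 1) :=
      Nat.pow_le_pow_right (by omega) (by omega)
    omega
  · intro h
    have : (2 : Nat) ^ PySem.Int.bitLength N ≤ 2 ^ m := Nat.pow_le_pow_right (by omega) h
    omega

-- ceiling-division bounds: c = ceil(L/l) satisfies (c-1)*l < L <= c*l
theorem ceil_div_bounds (L l : Nat) (hl : 1 ≤ l) (hL : 1 ≤ L) :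
    L ≤ ((L + l - 1) / l) * l ∧ ((L + l - 1) / l - 1) * l < L ∧ 1 ≤ (L + l - 1) / l := by
  obtain ⟨q, hq⟩ : ∃ q, (L + l - 1) / l = q := ⟨_, rfl⟩
  have e1 := Nat.div_add_mod (L + l - 1) l
  have e2 : (L + l - 1) % l < l := Nat.mod_lt _ (by omega)
  rw [hq] at e1
  have hq1 : 1 ≤ q := by
    rcases Nat.eq_zero_or_pos q with h | h
    · rw [h, Nat.mul_zero] at e1; omega
    · exact h
  have e3 : (q - 1) * l + l = q * l := by
    rw [Nat.sub_one_mul]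
    have : l ≤ q * l := Nat.le_mul_of_pos_left l hq1
    omega
  have e4 : q * l = l * q := Nat.mul_comm q l
  rw [hq]
  omega

-- loop invariant: at the head of iteration j (R = b^j), with K the final exponent
theorem montLoop_run (N : Int) (l : Nat) (hN : 1 ≤ N)
    (hodd : PySem.Int.mod N 2 = 1) (K : Nat) (hK2 : 2 ≤ K)
    (hKgt : N < (2 : Int) ^ (l * K))
    (hKleast : ∀ j, 2 ≤ j → j < K → ¬ N < (2 : Int) ^ (l * j)) :
    ∀ fuel j, 1 ≤ j → j ≤ K → K - j ≤ fuel →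
      montLoop N ((2 : Int) ^ l) fuel
        (if 2 ≤ j ∧ N < (2 : Int) ^ (l * j) then 1 else 0) ((2 : Int) ^ (l * j))
      = (2 : Int) ^ (l * K) := by
  intro fuel
  induction fuel with
  | zero =>
    intro j hj1 hjK hfuel
    have hjeq : j = K := by omega
    subst hjeq
    simp [montLoop]
  | succ fuel ih =>
    intro j hj1 hjK hfuel
    by_cases hjeq : j = K
    · subst hjeq
      rw [if_pos ⟨hK2, hKgt⟩]
      simp [montLoop]
    · have hjlt : j < K := by omega
      have hg : ¬ (2 ≤ j ∧ N < (2 : Int) ^ (l * j)) := by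
        rintro ⟨h2j, hlt⟩
        exact hKleast j h2j hjlt hlt
      rw [if_neg hg]
      rw [montLoop]
      rw [if_neg (by norm_num)]
      have hmul : (2 : Int) ^ (l * j) * (2 : Int) ^ l = (2 : Int) ^ (l * (j + 1)) := by
        rw [← pow_add]; ring_nf
      simp only [hmul]
      have hgcd : pyGcd ((2 : Int) ^ (l * (j + 1))) N = 1 :=
        pyGcd_pow_two _ N hN hodd
      by_cases hbig : N < (2 : Int) ^ (l * (j + 1))
      · rw [if_pos (show (2:Int) ^ (l * (j+1)) > N from hbig), hgcd]
        have h := ih (j + 1) (by omega) (by omega) (by omega)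
        rw [if_pos ⟨by omega, hbig⟩] at h
        exact h
      · rw [if_neg (by exact hbig)]
        have h := ih (j + 1) (by omega) (by omega) (by omega)
        rw [if_neg (by rintro ⟨_, h2⟩; exact hbig h2)] at h
        exact h

-- ===== VERDICT (by name: the statement is the Claim_ definition above) =====
theorem mont_findR_spec : Claim_equal_mont_findR := by
  intro N limb_size _hdom ⟨hN, hodd, hlimb⟩
  unfold Spec_mont_findR
  have hAdef : mont_findR N limb_size
      = montLoop N ((2 : Int) ^ limb_size.toNat) (N.natAbs + 2) 0 ((2 : Int) ^ limb_size.toNat) := rfl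
  have hBdef : mont_findR_alt N limb_size
      = (1 : Int) <<< ((max 2 (-(PySem.Int.floordiv (-(PySem.Int.bitLength N : Int)) limb_size))) * limb_size).toNat := rfl
  rw [hAdef, hBdef]
  set l : Nat := limb_size.toNat with hl_def
  have hl1 : 1 ≤ l := by omega
  have hlcast : (l : Int) = limb_size := Int.toNat_of_nonneg (by omega)
  set L : Nat := PySem.Int.bitLength N with hL_def
  have hbl := PySem.Int.lt_two_pow_bitLength N
  have hbl2 := PySem.Int.two_pow_bitLength_le N (by omega)
  rw [← hL_def] at hbl hbl2
  have hL1 : 1 ≤ L := by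
    by_contra h
    have h0 : L = 0 := by omega
    rw [h0, pow_zero] at hbl
    omega
  set c : Nat := (L + l - 1) / l with hc_def
  obtain ⟨hcl1, hcl2, hc1⟩ := ceil_div_bounds L l hl1 hL1
  rw [← hc_def] at hcl1 hcl2 hc1
  -- B's ceiling division equals c
  have hceil : -(PySem.Int.floordiv (-(L : Int)) limb_size) = (c : Int) := by
    rw [PySem.Int.neg_floordiv_neg_eq_iff_of_pos (by omega)]
    constructor
    · rw [← hlcast]
      have hsub : ((c : Int) - 1) = ((c - 1 : Nat) : Int) := by
        rw [Nat.cast_sub hc1]; simp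
      rw [hsub]
      exact_mod_cast hcl2
    · rw [← hlcast]
      exact_mod_cast hcl1
  set K : Nat := max 2 c with hK_def
  have hK2 : 2 ≤ K := le_max_left _ _
  have hKgt : N < (2 : Int) ^ (l * K) := by
    rw [lt_pow_iff_bitLength_le N hN, ← hL_def]
    calc L ≤ c * l := hcl1
    _ ≤ l * K := by rw [Nat.mul_comm]; exact Nat.mul_le_mul_left l (le_max_right _ _)
  have hKleast : ∀ j, 2 ≤ j → j < K → ¬ N < (2 : Int) ^ (l * j) := by
    intro j h2j hjK h
    rw [lt_pow_iff_bitLength_le N hN, ← hL_def] at h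
    have hjc : j < c := by omega
    have hle : l * j ≤ (c - 1) * l := by
      rw [Nat.mul_comm]
      exact Nat.mul_le_mul_right l (by omega)
    omega
  -- A's loop returns 2 ^ (l * K)
  have hA : montLoop N ((2 : Int) ^ l) (N.natAbs + 2) 0 ((2 : Int) ^ l) = (2 : Int) ^ (l * K) := by
    have hLle : L ≤ N.natAbs := by
      have h3 : L - 1 < 2 ^ (L - 1) := Nat.lt_two_pow_self
      have h4 : L - 1 < N.natAbs := lt_of_lt_of_le h3 hbl2
      omega
    have hcle : c ≤ L := by
      have h5 : c - 1 ≤ l * (c - 1) := Nat.le_mul_of_pos_left (c - 1) (by omega)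
      rw [Nat.mul_comm] at h5
      omega
    have hfuel : K - 1 ≤ N.natAbs + 2 := by omega
    have hrun := montLoop_run N l hN hodd K hK2 hKgt hKleast (N.natAbs + 2) 1
      (le_refl 1) (by omega) hfuel
    rw [if_neg (by omega), Nat.mul_one] at hrun
    exact hrun
  rw [hA, hceil, Int.shiftLeft_eq, one_mul]
  have hmax : ((K : Nat) : Int) = max 2 ((c : Int)) := by
    rw [hK_def]; push_cast; rfl
  rw [← hmax, ← hlcast, ← Nat.cast_mul, Int.toNat_natCast, Nat.mul_comm K l]
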